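-- pv_equiv track=rewrite | github.com/c-abell/AdventOfCode2020 | day1/Day1.py | splitnums
-- ===== SOURCE A (Python) =====
-- def splitnums(numbers):
--     bignums = []
--     littlenums = []
--     for number in numbers:
--         if int(number) > 999:
--             bignums.append(int(number))
--         else:
--             littlenums.append(int(number))
--     bignums.sort()
--     littlenums.sort()
--     return bignums, littlenums
-- ===== SOURCE B (Python) =====
-- def splitnums(numbers):
--     # sort-then-split: one sort of all numbers, split at the 999 threshold
--     allnums = sorted(int(n) for n in numbers)
--     i = 0
--     for v in allnums:
--         if v > 999:
--             break
--         i += 1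
--     return allnums[i:], allnums[:i]
-- ===== Notes on version B (the rewrite author's own statement) =====
-- stated objective: alternative
-- what changed: B converts everything once, sorts the whole list in a single sort, and splits the sorted list at the first element exceeding 999, instead of A's partition into two lists followed by two sorts.
import Mathlib
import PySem

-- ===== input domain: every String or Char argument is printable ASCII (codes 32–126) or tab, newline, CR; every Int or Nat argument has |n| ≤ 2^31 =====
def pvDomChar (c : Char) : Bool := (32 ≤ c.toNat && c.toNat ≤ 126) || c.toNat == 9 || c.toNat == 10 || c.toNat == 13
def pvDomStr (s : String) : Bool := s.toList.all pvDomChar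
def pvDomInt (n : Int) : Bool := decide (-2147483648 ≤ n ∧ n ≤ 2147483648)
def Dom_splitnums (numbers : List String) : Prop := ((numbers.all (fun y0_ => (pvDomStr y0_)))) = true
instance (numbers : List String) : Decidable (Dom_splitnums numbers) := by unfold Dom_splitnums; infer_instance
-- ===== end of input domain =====

-- B replaces A's partition-then-two-sorts by one sort of everything followed by a split
-- of the sorted list at the first element exceeding 999 (objective: alternative).

-- int(s); exact on Pre_splitnums, which demands every string parse (elsewhere Python raises ValueError)
def pint (s : String) : Int := (PySem.Int.ofStr? s).getD 0

-- ===== PORT A =====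
def splitnumsLoop (numbers : List String) (bignums littlenums : List Int) : List Int × List Int :=
  match numbers with
  | [] => (bignums, littlenums)
  | n :: rest =>
    if pint n > 999 then splitnumsLoop rest (bignums ++ [pint n]) littlenums
    else splitnumsLoop rest bignums (littlenums ++ [pint n])

def splitnums (numbers : List String) : List Int × List Int :=
  let p := splitnumsLoop numbers [] []
  (PySem.List.sorted p.1 (fun x => x) false, PySem.List.sorted p.2 (fun x => x) false)

-- ===== PORT B =====
-- the 'for v in allnums: if v > 999: break; i += 1' counter
def countSmall (xs : List Int) : Nat :=
  match xs with
  | [] => 0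
  | v :: rest => if v > 999 then 0 else countSmall rest + 1

def splitnums_alt (numbers : List String) : List Int × List Int :=
  let allnums := PySem.List.sorted (numbers.map pint) (fun x => x) false
  let i := countSmall allnums
  (allnums.drop i, allnums.take i)

-- ===== PRECONDITION & SPEC =====
-- Pre_ excludes exactly the inputs where int(number) raises ValueError in A.
def Pre_splitnums (numbers : List String) : Prop :=
  (numbers.all (fun s => (PySem.Int.ofStr? s).isSome)) = true
instance (numbers : List String) : Decidable (Pre_splitnums numbers) := by
  unfold Pre_splitnums; infer_instance

def pvWitness_splitnums : List String := ["1000", "3", "2000", "999", "1"]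

def Spec_splitnums (numbers : List String) (out : List Int × List Int) : Prop := out = splitnums_alt numbers
instance (numbers : List String) (out : List Int × List Int) : Decidable (Spec_splitnums numbers out) := by unfold Spec_splitnums; infer_instance

-- ===== CLAIM (what is proved, stated in full; the proofs are below) =====
def Claim_equal_splitnums : Prop := ∀ (numbers : List String), Dom_splitnums numbers → Pre_splitnums numbers → Spec_splitnums numbers (splitnums numbers)

-- ===== LEMMAS AND PROOFS =====

def pbig : Int → Bool := fun v => decide (v > 999)

lemma splitnumsLoop_eq (numbers : List String) :
    ∀ big little, splitnumsLoop numbers big little =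
      (big ++ (numbers.map pint).filter pbig,
       little ++ (numbers.map pint).filter (fun v => !pbig v)) := by
  induction numbers with
  | nil => intro big little; simp [splitnumsLoop]
  | cons n rest ih =>
    intro big little
    by_cases h : pint n > 999 <;>
      simp [splitnumsLoop, h, ih, pbig]

lemma count_take_drop (s : List Int) :
    s.take (countSmall s) = s.takeWhile (fun v => !pbig v) ∧
    s.drop (countSmall s) = s.dropWhile (fun v => !pbig v) := by
  induction s with
  | nil => simp [countSmall]
  | cons v rest ih =>
    by_cases h : v > 999 <;>
      simp [countSmall, h, List.takeWhile, List.dropWhile, pbig, ih.1, ih.2]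

lemma takeWhile_eq_filter (s : List Int) (hs : s.Pairwise (· ≤ ·)) :
    s.takeWhile (fun v => !pbig v) = s.filter (fun v => !pbig v) ∧
    s.dropWhile (fun v => !pbig v) = s.filter pbig := by
  induction s with
  | nil => simp
  | cons v rest ih =>
    rcases List.pairwise_cons.mp hs with ⟨hv, hrest⟩
    rcases ih hrest with ⟨iht, ihd⟩
    by_cases h : v > 999
    · have hall : ∀ y ∈ rest, pbig y = true := by
        intro y hy
        have := hv y hy
        simp only [pbig, decide_eq_true_eq]; omega
      have hft : rest.filter (fun v => !pbig v) = [] := by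
        apply List.filter_eq_nil_iff.2
        intro y hy; simp [hall y hy]
      have hfd : rest.filter pbig = rest := List.filter_eq_self.2 hall
      have hb : pbig v = true := by simp only [pbig, decide_eq_true_eq]; omega
      constructor
      · simp [hb, hft]
      · simp [hb, hfd]
    · have hb : pbig v = false := by simp only [pbig, decide_eq_false_iff_not]; omega
      constructor
      · simp [hb, iht]
      · simp [hb, ihd]

lemma sorted_filter (xs : List Int) (p : Int → Bool) :
    PySem.List.sorted (xs.filter p) (fun x => x) false =
      (PySem.List.sorted xs (fun x => x) false).filter p := by
  apply PySem.List.sorted_id_eq_of_perm_of_pairwise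
  · exact (PySem.List.sorted_perm xs (fun x => x) false).filter p
  · exact List.Pairwise.filter p (PySem.List.sorted_pairwise xs (fun x => x))

-- ===== VERDICT (by name: the statement is the Claim_ definition above) =====
theorem splitnums_spec : Claim_equal_splitnums := by
  intro numbers _ _
  unfold Spec_splitnums splitnums splitnums_alt
  set xs := numbers.map pint with hxs
  set s := PySem.List.sorted xs (fun x => x) false with hsdef
  have hpw : s.Pairwise (· ≤ ·) := PySem.List.sorted_pairwise xs (fun x => x)
  rcases count_take_drop s with ⟨ht, hd⟩
  rcases takeWhile_eq_filter s hpw with ⟨htf, hdf⟩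
  simp only [splitnumsLoop_eq, List.nil_append]
  rw [ht, hd, htf, hdf, ← sorted_filter, ← sorted_filter]
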